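-- pv_equiv track=rewrite | github.com/uncbiag/mermaid | experiments/experiment_utils.py | filter_names_for_boxplot
-- ===== SOURCE A (Python) =====
-- def filter_names_for_boxplot(names,suppress_pattern,suppress_pattern_keep_first_as):
--     idx = []
--     eff_names = []
--     found_first = False
--     for i,n in enumerate(names):
--         if n.endswith(suppress_pattern):
--             if not found_first:
--                 found_first = True
--                 idx.append(i)
--                 eff_names.append(suppress_pattern_keep_first_as)
--         else:
--             idx.append(i)
--             eff_names.append(n)
--
--     return idx,eff_names
-- ===== SOURCE B (Python) =====
-- def filter_names_for_boxplot(names, suppress_pattern, suppress_pattern_keep_first_as):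
--     first = next((i for i, n in enumerate(names) if n.endswith(suppress_pattern)), None)
--     pairs = [(i, suppress_pattern_keep_first_as if i == first else n)
--              for i, n in enumerate(names)
--              if not n.endswith(suppress_pattern) or i == first]
--     return [i for i, _ in pairs], [n for _, n in pairs]
-- ===== Notes on version B (the rewrite author's own statement) =====
-- stated objective: simpler
-- what changed: Replaces the stateful found_first flag loop with a two-phase find-then-rebuild: first compute the index of the first matching name, then one stateless comprehension keeps/renames entries by comparing each index with it.
import Mathlib
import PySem

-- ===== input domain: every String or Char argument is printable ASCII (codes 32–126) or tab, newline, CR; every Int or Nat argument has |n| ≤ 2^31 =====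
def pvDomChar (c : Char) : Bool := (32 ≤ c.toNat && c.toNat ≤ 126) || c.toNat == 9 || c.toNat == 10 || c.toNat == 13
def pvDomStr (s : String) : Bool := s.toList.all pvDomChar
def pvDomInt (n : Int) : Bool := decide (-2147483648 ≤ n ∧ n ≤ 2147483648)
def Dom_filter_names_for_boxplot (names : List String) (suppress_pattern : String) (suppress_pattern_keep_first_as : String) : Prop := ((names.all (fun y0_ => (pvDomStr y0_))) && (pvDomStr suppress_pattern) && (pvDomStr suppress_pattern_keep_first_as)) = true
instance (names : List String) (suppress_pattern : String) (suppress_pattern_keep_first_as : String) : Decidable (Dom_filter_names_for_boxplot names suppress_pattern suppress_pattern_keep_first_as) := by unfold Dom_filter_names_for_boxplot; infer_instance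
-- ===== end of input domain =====

-- B is a two-phase rewrite of A (find the first matching index, then one stateless rebuild pass);
-- same values everywhere, objective: simpler decomposition, no speed claim.

-- ===== PORT A =====
-- literal transliteration: one fold over enumerate(names) carrying (idx, eff_names, found_first)
def filter_names_for_boxplot (names : List String) (suppress_pattern : String) (suppress_pattern_keep_first_as : String) : List Int × List String :=
  let st := (PySem.List.enumerate names 0).foldl
    (fun (st : List Int × List String × Bool) (p : Int × String) =>
      if PySem.Str.endswith p.2 suppress_pattern then
        if st.2.2 = false then (st.1 ++ [p.1], st.2.1 ++ [suppress_pattern_keep_first_as], true)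
        else st
      else (st.1 ++ [p.1], st.2.1 ++ [p.2], st.2.2))
    ([], [], false)
  (st.1, st.2.1)

-- ===== PORT B =====
-- literal transliteration of Source B: first = index of first match (none if absent), then one
-- stateless filterMap pass building (index, name) pairs, finally the two projections.
def filter_names_for_boxplot_alt (names : List String) (suppress_pattern : String) (suppress_pattern_keep_first_as : String) : List Int × List String :=
  let first : Option Int :=
    ((PySem.List.enumerate names 0).find? (fun p => PySem.Str.endswith p.2 suppress_pattern)).map Prod.fst
  let pairs := (PySem.List.enumerate names 0).filterMap
    (fun p =>
      if !PySem.Str.endswith p.2 suppress_pattern || some p.1 == first then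
        some (p.1, if some p.1 == first then suppress_pattern_keep_first_as else p.2)
      else none)
  (pairs.map Prod.fst, pairs.map Prod.snd)

-- ===== PRECONDITION & SPEC =====
def Spec_filter_names_for_boxplot (names : List String) (suppress_pattern : String) (suppress_pattern_keep_first_as : String) (out : List Int × List String) : Prop := out = filter_names_for_boxplot_alt names suppress_pattern suppress_pattern_keep_first_as
instance (names : List String) (suppress_pattern : String) (suppress_pattern_keep_first_as : String) (out : List Int × List String) : Decidable (Spec_filter_names_for_boxplot names suppress_pattern suppress_pattern_keep_first_as out) := by unfold Spec_filter_names_for_boxplot; infer_instance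

-- ===== CLAIM (what is proved, stated in full; the proofs are below) =====
def Claim_equal_filter_names_for_boxplot : Prop := ∀ (names : List String) (suppress_pattern : String) (suppress_pattern_keep_first_as : String), Dom_filter_names_for_boxplot names suppress_pattern suppress_pattern_keep_first_as → Spec_filter_names_for_boxplot names suppress_pattern suppress_pattern_keep_first_as (filter_names_for_boxplot names suppress_pattern suppress_pattern_keep_first_as)

-- ===== LEMMAS AND PROOFS =====

-- canonical result of the whole computation, as a list of (index, name) pairs
-- (e abstracts the match test 'endswith suppress_pattern', ka is the replacement name)
def fnbSpec (e : Int × String → Bool) (ka : String) : List (Int × String) → List (Int × String)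
  | [] => []
  | p :: t =>
    if e p then (p.1, ka) :: t.filter (fun q => !e q)
    else p :: fnbSpec e ka t

-- A's fold with the flag already set only keeps non-matching entries
theorem fnb_foldl_true (e : Int × String → Bool) (ka : String) (l : List (Int × String))
    (idx : List Int) (eff : List String) :
    l.foldl
      (fun (st : List Int × List String × Bool) (p : Int × String) =>
        if e p then
          if st.2.2 = false then (st.1 ++ [p.1], st.2.1 ++ [ka], true) else st
        else (st.1 ++ [p.1], st.2.1 ++ [p.2], st.2.2))
      (idx, eff, true)
    = (idx ++ (l.filter (fun q => !e q)).map Prod.fst,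
       eff ++ (l.filter (fun q => !e q)).map Prod.snd, true) := by
  induction l generalizing idx eff with
  | nil => simp
  | cons p t ih =>
    cases h : e p <;> simp [List.foldl_cons, h, ih]

-- A's fold from the initial (flag = false) state computes fnbSpec
theorem fnb_foldl_false (e : Int × String → Bool) (ka : String) (l : List (Int × String))
    (idx : List Int) (eff : List String) :
    l.foldl
      (fun (st : List Int × List String × Bool) (p : Int × String) =>
        if e p then
          if st.2.2 = false then (st.1 ++ [p.1], st.2.1 ++ [ka], true) else st
        else (st.1 ++ [p.1], st.2.1 ++ [p.2], st.2.2))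
      (idx, eff, false)
    = (idx ++ (fnbSpec e ka l).map Prod.fst,
       eff ++ (fnbSpec e ka l).map Prod.snd,
       l.any e) := by
  induction l generalizing idx eff with
  | nil => simp [fnbSpec]
  | cons p t ih =>
    cases h : e p
    · simp [List.foldl_cons, h, ih, fnbSpec]
    · simp [List.foldl_cons, h, fnb_foldl_true, fnbSpec]

-- a filterMap that keeps or drops unchanged elements is a filter
theorem fnb_filterMap_keep (e : Int × String → Bool) (t : List (Int × String)) :
    t.filterMap (fun q => if e q = false then some q else none) = t.filter (fun q => !e q) := by
  induction t with
  | nil => rfl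
  | cons q u ih =>
    cases h : e q <;> simp [h, ih]

-- B's stateless pass computes fnbSpec on any pair list with strictly increasing indices
theorem fnb_filterMap_eq (e : Int × String → Bool) (ka : String) (l : List (Int × String))
    (hl : l.Pairwise (fun p q => p.1 < q.1)) :
    l.filterMap
      (fun p =>
        if !e p || some p.1 == ((l.find? e).map Prod.fst) then
          some (p.1, if some p.1 == ((l.find? e).map Prod.fst) then ka else p.2)
        else none)
    = fnbSpec e ka l := by
  induction l with
  | nil => rfl
  | cons p t ih =>
    rcases List.pairwise_cons.mp hl with ⟨hlt, hpt⟩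
    cases h : e p
    · -- p does not match: first match comes from the tail, whose indices all exceed p.1
      have hfind : (p :: t).find? e = t.find? e := by simp [h]
      have hne : (some p.1 == ((t.find? e).map Prod.fst)) = false := by
        cases hf : t.find? e with
        | none => simp
        | some r =>
          have := hlt r (List.mem_of_find?_eq_some hf)
          simp; omega
      rw [hfind, List.filterMap_cons, ih hpt]
      simp [fnbSpec, h, hne]
    · -- first match is p itself; in the tail no index equals p.1
      have hfind : (p :: t).find? e = some p := by simp [h]
      rw [hfind, List.filterMap_cons,
          List.filterMap_congr (g := fun q => if e q = false then some q else none) ?_,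
          fnb_filterMap_keep]
      · simp [fnbSpec, h]
      · intro q hq
        have hne : (some q.1 == some p.1) = false := by
          have := hlt q hq
          simp; omega
        cases hq2 : e q <;> simp [hne, hq2]

theorem fnb_main (names : List String) (sp ka : String) :
    filter_names_for_boxplot names sp ka = filter_names_for_boxplot_alt names sp ka := by
  simp only [filter_names_for_boxplot, filter_names_for_boxplot_alt]
  rw [fnb_foldl_false (fun p => PySem.Str.endswith p.2 sp) ka,
      fnb_filterMap_eq (fun p => PySem.Str.endswith p.2 sp) ka _
        (PySem.List.pairwise_lt_enumerate names 0)]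
  simp

-- ===== VERDICT (by name: the statement is the Claim_ definition above) =====
theorem filter_names_for_boxplot_spec : Claim_equal_filter_names_for_boxplot := by
  intro names sp ka _
  exact fnb_main names sp ka
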